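-- pv_equiv track=rewrite | github.com/dianewalls/github-actionable-insights | app.py | first_time_issues
-- ===== SOURCE A (Python) =====
-- def first_time_issues(issues):
--     first_time_issues = {}
--     for issue in issues:
--         user = issue['user']['login']
--         if user not in first_time_issues:
--             first_time_issues[user] = {"opened": 0, "closed": 0}
--         first_time_issues[user]["opened"] += 1
--         if issue.get("closed_at"):
--             first_time_issues[user]["closed"] += 1
--     return first_time_issues
-- ===== SOURCE B (Python) =====
-- def first_time_issues(issues):
--     opened = {}
--     for issue in issues:
--         u = issue['user']['login']
--         opened[u] = opened.get(u, 0) + 1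
--     closed = {}
--     for issue in issues:
--         if issue.get('closed_at'):
--             u = issue['user']['login']
--             closed[u] = closed.get(u, 0) + 1
--     return {u: {"opened": n, "closed": closed.get(u, 0)} for u, n in opened.items()}
-- ===== Notes on version B (the rewrite author's own statement) =====
-- stated objective: alternative
-- what changed: A's single interleaved loop that creates and mutates a nested per-user record is replaced by two independent counting scans (opened counts, closed counts) merged afterwards by one comprehension over the opened table, whose first-insertion order reproduces A's key order and whose 0-default handles users with no closed issues.
import Mathlib
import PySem

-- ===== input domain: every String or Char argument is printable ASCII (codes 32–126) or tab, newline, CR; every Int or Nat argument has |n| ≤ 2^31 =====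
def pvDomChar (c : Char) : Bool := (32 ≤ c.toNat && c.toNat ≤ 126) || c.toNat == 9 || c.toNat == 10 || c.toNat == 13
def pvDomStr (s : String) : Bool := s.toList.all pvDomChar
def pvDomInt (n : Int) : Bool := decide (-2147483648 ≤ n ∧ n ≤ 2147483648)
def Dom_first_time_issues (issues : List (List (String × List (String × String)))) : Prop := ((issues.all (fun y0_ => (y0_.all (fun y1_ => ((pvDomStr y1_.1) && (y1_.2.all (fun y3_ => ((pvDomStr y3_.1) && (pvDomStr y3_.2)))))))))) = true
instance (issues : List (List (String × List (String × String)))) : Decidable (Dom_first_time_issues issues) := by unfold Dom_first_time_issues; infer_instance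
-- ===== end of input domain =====

-- B differs from A only in decomposition: two counting scans plus a merge instead of one
-- interleaved loop over nested dicts; same return value on every input admitted by Pre_.

-- ===== PORT A =====
-- issue['user']['login']; total form, exact under Pre_ (both keys present)
def pvUser (issue : List (String × List (String × String))) : String :=
  (PySem.Dict.ofList ((PySem.Dict.ofList issue).getD "user" [])).getD "login" ""

-- issue.get("closed_at") is truthy ⇔ the key is present with a nonempty dict value
def pvClosed (issue : List (String × List (String × String))) : Bool :=
  !((PySem.Dict.ofList issue).getD "closed_at" []).isEmpty

-- the body of A's loop, step for step
def pvStepA (d : PySem.Dict String (PySem.Dict String Int))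
    (issue : List (String × List (String × String))) : PySem.Dict String (PySem.Dict String Int) :=
  let user := pvUser issue
  let d1 := if d.contains user then d
            else d.insert user (PySem.Dict.ofList [("opened", (0 : Int)), ("closed", (0 : Int))])
  let d2 := d1.insert user ((d1.getD user PySem.Dict.empty).modify "opened" 0 (· + 1))
  if pvClosed issue then
    d2.insert user ((d2.getD user PySem.Dict.empty).modify "closed" 0 (· + 1))
  else d2

def first_time_issues (issues : List (List (String × List (String × String)))) : List (String × List (String × Int)) :=
  ((issues.foldl pvStepA PySem.Dict.empty).items.map (fun p => (p.1, p.2.items)))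

-- ===== PORT B =====
def first_time_issues_alt (issues : List (List (String × List (String × String)))) : List (String × List (String × Int)) :=
  let opened := issues.foldl (fun d issue => d.insert (pvUser issue) (d.getD (pvUser issue) 0 + 1))
      (PySem.Dict.empty : PySem.Dict String Int)
  let closed := issues.foldl (fun d issue =>
      if pvClosed issue then d.insert (pvUser issue) (d.getD (pvUser issue) 0 + 1) else d)
      (PySem.Dict.empty : PySem.Dict String Int)
  opened.items.map (fun p => (p.1, [("opened", p.2), ("closed", closed.getD p.1 0)]))

-- ===== PRECONDITION & SPEC =====
-- Pre_ excludes exactly the inputs where A raises KeyError: an issue without a 'user' key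
-- or whose user dict has no 'login' key.
def Pre_first_time_issues (issues : List (List (String × List (String × String)))) : Prop :=
  (issues.all (fun issue =>
    match (PySem.Dict.ofList issue).get? "user" with
    | some u => (PySem.Dict.ofList u).contains "login"
    | none => false)) = true
instance (issues : List (List (String × List (String × String)))) : Decidable (Pre_first_time_issues issues) := by unfold Pre_first_time_issues; infer_instance
def pvWitness_first_time_issues : (List (List (String × List (String × String)))) :=
  [[("user", [("login", "alice")]), ("closed_at", [("d", "2020")])], [("user", [("login", "bob")])]]

def Spec_first_time_issues (issues : List (List (String × List (String × String)))) (out : List (String × List (String × Int))) : Prop := out = first_time_issues_alt issues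
instance (issues : List (List (String × List (String × String)))) (out : List (String × List (String × Int))) : Decidable (Spec_first_time_issues issues out) := by unfold Spec_first_time_issues; infer_instance

-- ===== CLAIM (what is proved, stated in full; the proofs are below) =====
def Claim_equal_first_time_issues : Prop := ∀ (issues : List (List (String × List (String × String)))), Dom_first_time_issues issues → Pre_first_time_issues issues → Spec_first_time_issues issues (first_time_issues issues)

-- ===== LEMMAS AND PROOFS =====

lemma pv_modify_opened (o c : Int) :
    (PySem.Dict.mk [("opened", o), ("closed", c)] : PySem.Dict String Int).modify "opened" 0 (· + 1)
      = PySem.Dict.mk [("opened", o + 1), ("closed", c)] := by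
  simp [PySem.Dict.modify, PySem.Dict.insert, PySem.Dict.contains, PySem.Dict.getD, PySem.Dict.get?_mk_cons]
lemma pv_modify_closed (o c : Int) :
    (PySem.Dict.mk [("opened", o), ("closed", c)] : PySem.Dict String Int).modify "closed" 0 (· + 1)
      = PySem.Dict.mk [("opened", o), ("closed", c + 1)] := by
  simp [PySem.Dict.modify, PySem.Dict.insert, PySem.Dict.contains, PySem.Dict.getD, PySem.Dict.get?_mk_cons]

def pvInner (l : List (List (String × List (String × String)))) (u : String) : List (String × Int) :=
  [("opened", ((l.map pvUser).count u : Int)),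
   ("closed", (((l.filter pvClosed).map pvUser).count u : Int))]

lemma pvInner_append (pre : List (List (String × List (String × String))))
    (x : List (String × List (String × String))) (u : String) :
    pvInner (pre ++ [x]) u =
      if u = pvUser x then
        [("opened", ((pre.map pvUser).count u : Int) + 1),
         ("closed", (((pre.filter pvClosed).map pvUser).count u : Int) + (if pvClosed x then 1 else 0))]
      else pvInner pre u := by
  by_cases h : u = pvUser x <;>
    by_cases hcl : pvClosed x <;>
      simp [pvInner, h, hcl, List.filter_append, List.count_append, List.count_singleton] <;>
        exact fun h' => h h'.symm

lemma pv_step (pre : List (List (String × List (String × String))))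
    (x : List (String × List (String × String)))
    (d : PySem.Dict String (PySem.Dict String Int))
    (hk : d.keys = PySem.Set.ofList (pre.map pvUser))
    (hv : ∀ u ∈ d.keys, (d.getD u PySem.Dict.empty).items = pvInner pre u) :
    (pvStepA d x).keys = PySem.Set.ofList ((pre ++ [x]).map pvUser) ∧
    ∀ u ∈ (pvStepA d x).keys, ((pvStepA d x).getD u PySem.Dict.empty).items = pvInner (pre ++ [x]) u := by
  classical
  have hkeys' : PySem.Set.ofList ((pre ++ [x]).map pvUser)
      = PySem.Set.add d.keys (pvUser x) := by
    rw [hk, List.map_append, List.map_singleton, PySem.Set.ofList_append_singleton]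
  by_cases hc : d.contains (pvUser x)
  · have hmem : pvUser x ∈ d.keys := (PySem.Dict.contains_iff_mem_keys _ _).mp hc
    have hin : d.getD (pvUser x) PySem.Dict.empty = PySem.Dict.mk (pvInner pre (pvUser x)) := by
      apply PySem.Dict.ext; simpa using hv _ hmem
    have hstep : pvStepA d x = d.insert (pvUser x)
        (PySem.Dict.mk [("opened", ((pre.map pvUser).count (pvUser x) : Int) + 1),
          ("closed", (((pre.filter pvClosed).map pvUser).count (pvUser x) : Int)
              + (if pvClosed x then 1 else 0))]) := by
      by_cases hcl : pvClosed x <;>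
        simp [pvStepA, hc, hcl, hin, pvInner, pv_modify_opened, pv_modify_closed,
          PySem.Dict.getD_insert_self, PySem.Dict.insert_insert_self]
    rw [hstep]
    refine ⟨?_, ?_⟩
    · rw [PySem.Dict.keys_insert_of_contains d _ hc, hkeys', PySem.Set.add_of_mem hmem]
    · intro u hu
      rw [PySem.Dict.keys_insert_of_contains d _ hc] at hu
      rw [PySem.Dict.getD_insert, pvInner_append]
      by_cases he : u = pvUser x
      · simp [he]
      · simp only [he, if_false]
        exact hv u hu
  · have hc' : d.contains (pvUser x) = false := by simpa using hc
    have hmem : pvUser x ∉ d.keys := fun h =>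
      hc ((PySem.Dict.contains_iff_mem_keys _ _).mpr h)
    have e1 : ((PySem.Dict.empty.update [("opened", (0:Int)), ("closed", 0)]).modify "opened" 0 (· + 1))
        = PySem.Dict.mk [("opened", (1:Int)), ("closed", 0)] := rfl
    have e2 : ((PySem.Dict.mk [("opened", (1:Int)), ("closed", 0)] : PySem.Dict String Int).modify "closed" 0 (· + 1))
        = PySem.Dict.mk [("opened", (1:Int)), ("closed", 1)] := rfl
    have hcnt : (pre.map pvUser).count (pvUser x) = 0 := by
      rw [List.count_eq_zero]
      intro h; exact hmem (by rw [hk, PySem.Set.mem_ofList]; exact h)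
    have hcntf : ((pre.filter pvClosed).map pvUser).count (pvUser x) = 0 := by
      rw [List.count_eq_zero]
      intro h
      rcases List.mem_map.mp h with ⟨i, hi, hie⟩
      exact hmem (by
        rw [hk, PySem.Set.mem_ofList]
        exact List.mem_map.mpr ⟨i, (List.mem_filter.mp hi).1, hie⟩)
    have hstep : pvStepA d x = d.insert (pvUser x)
        (PySem.Dict.mk [("opened", ((pre.map pvUser).count (pvUser x) : Int) + 1),
          ("closed", (((pre.filter pvClosed).map pvUser).count (pvUser x) : Int)
              + (if pvClosed x then 1 else 0))]) := by
      by_cases hcl : pvClosed x <;>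
        simp [pvStepA, hc, hcl, hcnt, hcntf, e1, e2,
          PySem.Dict.getD_insert_self, PySem.Dict.insert_insert_self, PySem.Dict.ofList]
    rw [hstep]
    refine ⟨?_, ?_⟩
    · rw [PySem.Dict.keys_insert_of_not_contains d _ hc', hkeys',
        PySem.Set.add_of_not_mem hmem]
    · intro u hu
      rw [PySem.Dict.keys_insert_of_not_contains d _ hc'] at hu
      rw [PySem.Dict.getD_insert, pvInner_append]
      by_cases he : u = pvUser x
      · simp [he]
      · simp only [he, if_false]
        refine hv u ?_
        rcases List.mem_append.mp hu with h | h
        · exact h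
        · exact absurd (List.mem_singleton.mp h) he


lemma pv_A_inv (l pre : List (List (String × List (String × String))))
    (d : PySem.Dict String (PySem.Dict String Int))
    (hk : d.keys = PySem.Set.ofList (pre.map pvUser))
    (hv : ∀ u ∈ d.keys, (d.getD u PySem.Dict.empty).items = pvInner pre u) :
    (l.foldl pvStepA d).keys = PySem.Set.ofList ((pre ++ l).map pvUser) ∧
    ∀ u ∈ (l.foldl pvStepA d).keys,
      ((l.foldl pvStepA d).getD u PySem.Dict.empty).items = pvInner (pre ++ l) u := by
  induction l generalizing pre d with
  | nil => simpa using ⟨hk, hv⟩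
  | cons x t ih =>
    obtain ⟨hk1, hv1⟩ := pv_step pre x d hk hv
    have := ih (pre ++ [x]) (pvStepA d x) hk1 hv1
    simpa [List.append_assoc] using this

lemma pv_A_eq (issues : List (List (String × List (String × String)))) :
    first_time_issues issues
      = (PySem.Set.ofList (issues.map pvUser)).map (fun u => (u, pvInner issues u)) := by
  obtain ⟨hk, hv⟩ := pv_A_inv issues [] PySem.Dict.empty rfl (by intro u hu; simp [PySem.Dict.keys, PySem.Dict.empty] at hu)
  simp only [List.nil_append] at hk hv
  have hnd : (issues.foldl pvStepA PySem.Dict.empty).keys.Nodup := by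
    rw [hk]; exact PySem.Set.nodup_ofList _
  unfold first_time_issues
  rw [PySem.Dict.items_eq_map_keys _ hnd PySem.Dict.empty, List.map_map]
  rw [hk] at hv ⊢
  exact List.map_congr_left (fun u hu => by simp [hv u hu])

lemma pv_B_eq (issues : List (List (String × List (String × String)))) :
    first_time_issues_alt issues
      = (PySem.Set.ofList (issues.map pvUser)).map (fun u => (u, pvInner issues u)) := by
  simp only [first_time_issues_alt]
  have hko : (issues.foldl (fun d issue => d.insert (pvUser issue) (d.getD (pvUser issue) 0 + 1))
      (PySem.Dict.empty : PySem.Dict String Int)).keys = PySem.Set.ofList (issues.map pvUser) := by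
    rw [PySem.Dict.keys_foldl_insert_key issues pvUser _ _]
    simp [PySem.Dict.keys, PySem.Dict.empty, PySem.Set.update_nil_left]
  have hnd : (issues.foldl (fun d issue => d.insert (pvUser issue) (d.getD (pvUser issue) 0 + 1))
      (PySem.Dict.empty : PySem.Dict String Int)).keys.Nodup := by
    rw [hko]; exact PySem.Set.nodup_ofList _
  have hgo : ∀ u, (issues.foldl (fun d issue => d.insert (pvUser issue) (d.getD (pvUser issue) 0 + 1))
      (PySem.Dict.empty : PySem.Dict String Int)).getD u 0 = ((issues.map pvUser).count u : Int) := by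
    intro u
    have hrw := List.foldl_map (f := pvUser)
      (g := fun (d : PySem.Dict String Int) x => d.insert x (d.getD x 0 + 1)) (l := issues)
      (init := (PySem.Dict.empty : PySem.Dict String Int))
    rw [← hrw, PySem.Dict.getD_foldl_insert_add_one]
    simp [PySem.Dict.getD, PySem.Dict.get?, PySem.Dict.empty]
  have hgc : ∀ u, (issues.foldl (fun d issue =>
      if pvClosed issue then d.insert (pvUser issue) (d.getD (pvUser issue) 0 + 1) else d)
      (PySem.Dict.empty : PySem.Dict String Int)).getD u 0
        = (((issues.filter pvClosed).map pvUser).count u : Int) := by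
    intro u
    have hif := PySem.List.foldl_if_eq_foldl_filter pvClosed
      (fun (d : PySem.Dict String Int) issue => d.insert (pvUser issue) (d.getD (pvUser issue) 0 + 1))
      issues (PySem.Dict.empty : PySem.Dict String Int)
    rw [hif]
    have hrw := List.foldl_map (f := pvUser)
      (g := fun (d : PySem.Dict String Int) x => d.insert x (d.getD x 0 + 1)) (l := issues.filter pvClosed)
      (init := (PySem.Dict.empty : PySem.Dict String Int))
    rw [← hrw, PySem.Dict.getD_foldl_insert_add_one]
    simp [PySem.Dict.getD, PySem.Dict.get?, PySem.Dict.empty]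
  rw [PySem.Dict.items_eq_map_keys _ hnd 0, List.map_map, hko]
  exact List.map_congr_left (fun u hu => by simp [pvInner, hgo u, hgc u])


-- ===== VERDICT (by name: the statement is the Claim_ definition above) =====
theorem first_time_issues_spec : Claim_equal_first_time_issues := by
  intro issues _ _
  unfold Spec_first_time_issues
  rw [pv_A_eq, pv_B_eq]
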